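-- pv_equiv track=rewrite | github.com/GrinenkoIvan/Python-313 | 28.01.2024.py | func
-- ===== SOURCE A (Python) =====
-- def func(args):
--     if len(args) == 0:
--         let = 0
--         return let
--     elif args[0] > 0:
--         return func(args[1:])
--     else:
--         let = 1
--         return let + func(args[1:])
-- ===== SOURCE B (Python) =====
-- def func(args):
--     count = 0
--     for x in args:
--         if not (x > 0):
--             count += 1
--     return count
-- ===== Notes on version B (the rewrite author's own statement) =====
-- stated objective: faster
-- what changed: Replaces the linear recursion that copies the tail by slicing at every step (and hits Python's recursion limit) with a single iterative pass over the list keeping a counter.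
import Mathlib
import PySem

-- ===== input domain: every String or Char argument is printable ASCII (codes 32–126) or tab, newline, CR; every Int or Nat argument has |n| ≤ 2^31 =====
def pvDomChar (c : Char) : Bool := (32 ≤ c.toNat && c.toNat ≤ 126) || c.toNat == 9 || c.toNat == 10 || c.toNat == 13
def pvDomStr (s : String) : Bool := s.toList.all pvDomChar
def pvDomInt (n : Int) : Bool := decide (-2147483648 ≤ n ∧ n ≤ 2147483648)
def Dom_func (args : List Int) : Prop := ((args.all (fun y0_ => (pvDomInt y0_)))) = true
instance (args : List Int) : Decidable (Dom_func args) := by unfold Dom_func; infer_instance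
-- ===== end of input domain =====

-- B replaces A's slicing recursion by one iterative counting pass (simpler).

-- ===== PORT A =====
-- literal transliteration of A's recursion: empty → 0; head > 0 → recurse on tail; else 1 + recurse on tail
def func (args : List Int) : Int :=
  if args.length = 0 then 0
  else if args.head! > 0 then func (args.drop 1)
  else 1 + func (args.drop 1)
termination_by args.length
decreasing_by all_goals simp only [List.length_drop]; omega

-- ===== PORT B =====
-- B's loop: count = 0; for x in args: if not (x > 0): count += 1
def func_alt (args : List Int) : Int :=
  args.foldl (fun count x => if ¬ (x > 0) then count + 1 else count) 0

-- ===== PRECONDITION & SPEC =====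
def Spec_func (args : List Int) (out : Int) : Prop := out = func_alt args
instance (args : List Int) (out : Int) : Decidable (Spec_func args out) := by unfold Spec_func; infer_instance

-- ===== CLAIM (what is proved, stated in full; the proofs are below) =====
def Claim_equal_func : Prop := ∀ (args : List Int), Dom_func args → Spec_func args (func args)

-- ===== LEMMAS AND PROOFS =====
theorem func_alt_acc (args : List Int) (c : Int) :
    args.foldl (fun count x => if ¬ (x > 0) then count + 1 else count) c
      = c + args.foldl (fun count x => if ¬ (x > 0) then count + 1 else count) 0 := by
  induction args generalizing c with
  | nil => simp [List.foldl]
  | cons x xs ih =>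
    simp only [List.foldl]
    rw [ih, ih (if ¬ (x > 0) then (0:Int) + 1 else 0)]
    split_ifs <;> ring

theorem func_eq (args : List Int) : func args = func_alt args := by
  induction args with
  | nil => simp [func, func_alt]
  | cons x xs ih =>
    rw [func]
    simp only [List.length_cons, List.head!, List.drop_one, List.tail]
    by_cases h : x > 0
    · simp [h, ih, func_alt, List.foldl]
    · rw [if_neg (by omega : ¬ (xs.length + 1 = 0)), if_neg h, ih]
      show 1 + func_alt xs = func_alt (x :: xs)
      unfold func_alt
      rw [List.foldl_cons, if_pos (show ¬ x > 0 from h)]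
      rw [func_alt_acc xs (0+1)]
      ring

-- ===== VERDICT (by name: the statement is the Claim_ definition above) =====
theorem func_spec : Claim_equal_func := by
  intro args _
  exact func_eq args
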